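-- pv_equiv track=rewrite | github.com/dece/Bebop | bebop/rendering.py | _find_next_sep
-- ===== SOURCE A (Python) =====
-- SPLIT_CHARS = " \t-"
--
-- def _find_next_sep(text):
--     indices = []
--     for sep in SPLIT_CHARS:
--         try:
--             indices.append((sep, text.index(sep)))
--         except ValueError:
--             pass
--     if not indices:
--         return ("", 0)
--     return min(indices, key=lambda e: e[1])
-- ===== SOURCE B (Python) =====
-- SPLIT_CHARS = " \t-"
--
-- def _find_next_sep(text):
--     for i, ch in enumerate(text):
--         if ch in SPLIT_CHARS:
--             return (ch, i)
--     return ("", 0)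
-- ===== Notes on version B (the rewrite author's own statement) =====
-- stated objective: simpler
-- what changed: Replaces the three separate text.index scans collected into a list and reduced with min-by-index by a single left-to-right pass over the text that returns the first separator character and its index immediately.
import Mathlib
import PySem

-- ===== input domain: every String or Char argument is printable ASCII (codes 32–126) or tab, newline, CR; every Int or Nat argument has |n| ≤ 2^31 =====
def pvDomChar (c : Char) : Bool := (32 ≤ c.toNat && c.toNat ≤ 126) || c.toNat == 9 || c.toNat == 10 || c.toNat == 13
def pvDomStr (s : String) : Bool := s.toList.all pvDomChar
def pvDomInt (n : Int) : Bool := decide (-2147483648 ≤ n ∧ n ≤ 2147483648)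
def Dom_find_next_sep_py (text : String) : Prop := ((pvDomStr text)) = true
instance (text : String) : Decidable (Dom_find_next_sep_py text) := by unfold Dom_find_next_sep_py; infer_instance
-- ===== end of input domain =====

-- B replaces A's three separate text.index scans + min-by-index with one short-circuiting forward pass (simpler, same asymptotics).

-- ===== PORT A =====
-- for sep in SPLIT_CHARS: try: indices.append((sep, text.index(sep))) except ValueError: pass
-- (text.index(sep) raises ValueError exactly when PySem.Chars.find = -1; the except swallows it, so nothing is appended)
def aIndices (cs : List Char) : List (String × Int) :=
  [' ', '\t', '-'].foldl (fun acc sep =>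
    let i := PySem.Chars.find cs [sep]
    if i = -1 then acc else acc ++ [(String.ofList [sep], i)]) []

-- if not indices: return ("", 0) / return min(indices, key=lambda e: e[1])
def find_next_sep_py (text : String) : String × Int :=
  let indices := aIndices text.toList
  if indices = [] then ("", 0)
  else (PySem.List.min? indices (fun e => e.2)).getD ("", 0)

-- ===== PORT B =====
-- for i, ch in enumerate(text): if ch in " \t-": return (ch, i)  /  return ("", 0)
def bGo (cs : List Char) (i : Int) : String × Int :=
  match cs with
  | [] => ("", 0)
  | c :: rest => if c = ' ' ∨ c = '\t' ∨ c = '-' then (String.ofList [c], i) else bGo rest (i + 1)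

def find_next_sep_py_alt (text : String) : String × Int := bGo text.toList 0

-- ===== PRECONDITION & SPEC =====
def Spec_find_next_sep_py (text : String) (out : String × Int) : Prop := out = find_next_sep_py_alt text
instance (text : String) (out : String × Int) : Decidable (Spec_find_next_sep_py text out) := by unfold Spec_find_next_sep_py; infer_instance

-- ===== CLAIM (what is proved, stated in full; the proofs are below) =====
def Claim_equal_find_next_sep_py : Prop := ∀ (text : String), Dom_find_next_sep_py text → Spec_find_next_sep_py text (find_next_sep_py text)

-- ===== LEMMAS AND PROOFS =====

theorem find_go_cons (a c : Char) (cs : List Char) (k : Nat) :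
    PySem.Chars.find.go [a] (c :: cs) k =
      if a = c then (k : Int) else PySem.Chars.find.go [a] cs (k + 1) := by
  rw [PySem.Chars.find.go]
  simp [List.isPrefixOf]

theorem find_go_nil (a : Char) (k : Nat) : PySem.Chars.find.go [a] [] k = -1 := by
  rw [PySem.Chars.find.go]; simp

theorem find_go_shift (a : Char) (cs : List Char) (k : Nat) :
    PySem.Chars.find.go [a] cs k =
      if PySem.Chars.find cs [a] = -1 then -1 else PySem.Chars.find cs [a] + k := by
  induction cs generalizing k with
  | nil => simp [find_go_nil, PySem.Chars.find, find_go_nil]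
  | cons c t ih =>
    have hle : (-1 : Int) ≤ PySem.Chars.find t [a] := PySem.Chars.neg_one_le_find t [a]
    rw [find_go_cons]
    unfold PySem.Chars.find
    rw [find_go_cons]
    by_cases h : a = c
    · simp [h]
    · simp only [h, if_false]
      rw [ih (k+1), ih 1]
      by_cases h2 : PySem.Chars.find t [a] = -1
      · simp [h2]
      · have h3 : ¬ (PySem.Chars.find t [a] + ((1:Nat):Int) = -1) := by push_cast; omega
        simp only [h2, if_false, h3]
        push_cast; ring

theorem find_singleton_cons (a c : Char) (cs : List Char) :
    PySem.Chars.find (c :: cs) [a] =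
      if a = c then 0
      else if PySem.Chars.find cs [a] = -1 then -1 else PySem.Chars.find cs [a] + 1 := by
  show PySem.Chars.find.go [a] (c :: cs) 0 = _
  rw [find_go_cons, find_go_shift]
  norm_num

theorem aIndices_eq (cs : List Char) : aIndices cs =
    (if PySem.Chars.find cs [' '] = -1 then [] else [((" " : String), PySem.Chars.find cs [' '])]) ++
    (if PySem.Chars.find cs ['\t'] = -1 then [] else [(("\t" : String), PySem.Chars.find cs ['\t'])]) ++
    (if PySem.Chars.find cs ['-'] = -1 then [] else [(("-" : String), PySem.Chars.find cs ['-'])]) := by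
  simp only [aIndices, List.foldl]
  split_ifs <;> simp_all

theorem bGo_shift (cs : List Char) (k : Int) :
    bGo cs k = ((bGo cs 0).1, if (bGo cs 0).1 = "" then 0 else (bGo cs 0).2 + k) := by
  induction cs generalizing k with
  | nil => simp [bGo]
  | cons c t ih =>
    by_cases h : c = ' ' ∨ c = '\t' ∨ c = '-'
    · have hne : String.ofList [c] ≠ "" := by
        rcases h with h | h | h <;> subst h <;> decide
      simp [bGo, h, hne]
    · simp only [bGo, h, if_false]
      rw [ih (k+1)]
      norm_num
      rw [ih 1]
      by_cases h2 : (bGo t 0).1 = "" <;> simp [h2] <;> ring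

def minStep (acc : Option (String × Int)) (x : String × Int) : Option (String × Int) :=
  match acc with
  | none => some x
  | some m => if x.2 < m.2 then some x else some m

theorem min?_eq_foldl_minStep (l : List (String × Int)) :
    PySem.List.min? l (fun e => e.2) = l.foldl minStep none := by
  unfold PySem.List.min?
  congr 1
  funext acc x
  cases acc <;> rfl

theorem minMapShiftAux (l : List (String × Int)) (acc : Option (String × Int)) :
    List.foldl minStep (acc.map (fun e => (e.1, e.2 + 1))) (l.map (fun e => (e.1, e.2 + 1)))
    = (List.foldl minStep acc l).map (fun e => (e.1, e.2 + 1)) := by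
  induction l generalizing acc with
  | nil => rfl
  | cons e r ih =>
    simp only [List.map, List.foldl]
    cases acc with
    | none => exact ih (some e)
    | some m =>
      simp only [Option.map_some, minStep]
      by_cases h : e.2 < m.2
      · rw [if_pos (by omega), if_pos h]; exact ih (some e)
      · rw [if_neg (by omega), if_neg h]; exact ih (some m)

theorem minMapShift (l : List (String × Int)) :
    PySem.List.min? (l.map (fun e => (e.1, e.2 + 1))) (fun e => e.2)
      = (PySem.List.min? l (fun e => e.2)).map (fun e => (e.1, e.2 + 1)) := by
  rw [min?_eq_foldl_minStep, min?_eq_foldl_minStep]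
  simpa using minMapShiftAux l none

theorem aIndices_fst_ne (cs : List Char) (e : String × Int) (he : e ∈ aIndices cs) : e.1 ≠ "" := by
  rw [aIndices_eq] at he
  simp only [List.mem_append] at he
  rcases he with (he | he) | he <;> split_ifs at he <;> simp_all

theorem main_lemma (cs : List Char) :
    (let indices := aIndices cs;
     if indices = [] then (("" : String), (0 : Int))
     else (PySem.List.min? indices (fun e => e.2)).getD ("", 0)) = bGo cs 0 := by
  induction cs with
  | nil => decide
  | cons c t ih =>
    simp only []
    have h1le := PySem.Chars.neg_one_le_find t [' ']
    have h2le := PySem.Chars.neg_one_le_find t ['\t']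
    have h3le := PySem.Chars.neg_one_le_find t ['-']
    rw [aIndices_eq, find_singleton_cons, find_singleton_cons, find_singleton_cons]
    by_cases hc1 : c = ' '
    · subst hc1
      simp only [show (('\t':Char) = ' ') = False from by decide,
                 show (('-':Char) = ' ') = False from by decide,
                 show ((' ':Char) = ' ') = True from by decide, if_false, if_true]
      generalize PySem.Chars.find t ['\t'] = f2 at h2le
      generalize PySem.Chars.find t ['-'] = f3 at h3le
      have n2 : ¬(f2 + 1 = -1) := by omega
      have n3 : ¬(f3 + 1 = -1) := by omega
      rcases eq_or_ne f2 (-1) with h2 | h2 <;> rcases eq_or_ne f3 (-1) with h3 | h3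
      all_goals simp only [h2, h3, n2, n3, eq_self_iff_true, if_true, if_false]
      all_goals norm_num
      all_goals (try rw [if_neg (by simp)])
      all_goals rw [min?_eq_foldl_minStep]
      all_goals simp only [List.foldl, minStep]
      all_goals (try split_ifs)
      all_goals (try split_ifs)
      all_goals (try (split <;> first | rfl | omega | (exfalso; omega)))
      all_goals first | rfl | omega | (exfalso; omega) | simp [bGo]
      all_goals (try split)
      all_goals first | rfl | omega | (exfalso; omega) | simp_all
    · by_cases hc2 : c = '\t'
      · subst hc2
        simp only [show ((' ':Char) = '\t') = False from by decide,
                   show (('-':Char) = '\t') = False from by decide,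
                   show (('\t':Char) = '\t') = True from by decide, if_false, if_true]
        generalize PySem.Chars.find t [' '] = f1 at h1le
        generalize PySem.Chars.find t ['-'] = f3 at h3le
        have n1 : ¬(f1 + 1 = -1) := by omega
        have n3 : ¬(f3 + 1 = -1) := by omega
        rcases eq_or_ne f1 (-1) with h1 | h1 <;> rcases eq_or_ne f3 (-1) with h3 | h3
        all_goals simp only [h1, h3, n1, n3, eq_self_iff_true, if_true, if_false]
        all_goals norm_num
        all_goals (try rw [if_neg (by simp)])
        all_goals rw [min?_eq_foldl_minStep]
        all_goals simp only [List.foldl, minStep]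
        all_goals (try split_ifs)
        all_goals (try split_ifs)
        all_goals (try (split <;> first | rfl | omega | (exfalso; omega)))
        all_goals first | rfl | omega | (exfalso; omega) | simp [bGo]
        all_goals (try split)
        all_goals first | rfl | omega | (exfalso; omega) | simp_all
      · by_cases hc3 : c = '-'
        · subst hc3
          simp only [show ((' ':Char) = '-') = False from by decide,
                     show (('\t':Char) = '-') = False from by decide,
                     show (('-':Char) = '-') = True from by decide, if_false, if_true]
          generalize PySem.Chars.find t [' '] = f1 at h1le
          generalize PySem.Chars.find t ['\t'] = f2 at h2le
          have n1 : ¬(f1 + 1 = -1) := by omega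
          have n2 : ¬(f2 + 1 = -1) := by omega
          rcases eq_or_ne f1 (-1) with h1 | h1 <;> rcases eq_or_ne f2 (-1) with h2 | h2
          all_goals simp only [h1, h2, n1, n2, eq_self_iff_true, if_true, if_false]
          all_goals norm_num
          all_goals (try rw [if_neg (by simp)])
          all_goals rw [min?_eq_foldl_minStep]
          all_goals simp only [List.foldl, minStep]
          all_goals (try split_ifs)
          all_goals (try split_ifs)
          all_goals (try (split <;> first | rfl | omega | (exfalso; omega)))
          all_goals first | rfl | omega | (exfalso; omega) | simp [bGo]
          all_goals (try split)
          all_goals first | rfl | omega | (exfalso; omega) | simp_all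
        · -- c is not a separator: every entry shifts by one
          have hcs : ¬(c = ' ' ∨ c = '\t' ∨ c = '-') := by tauto
          simp only [eq_false (fun h => hc1 (Eq.symm h)), eq_false (fun h => hc2 (Eq.symm h)),
                     eq_false (fun h => hc3 (Eq.symm h)), if_false]
          have n1 : ¬(PySem.Chars.find t [' '] + 1 = -1) := by omega
          have n2 : ¬(PySem.Chars.find t ['\t'] + 1 = -1) := by omega
          have n3 : ¬(PySem.Chars.find t ['-'] + 1 = -1) := by omega
          have hmap : ((if (if PySem.Chars.find t [' '] = -1 then (-1:Int) else PySem.Chars.find t [' '] + 1) = -1 then [] else [((" ":String), if PySem.Chars.find t [' '] = -1 then (-1:Int) else PySem.Chars.find t [' '] + 1)]) ++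
              (if (if PySem.Chars.find t ['\t'] = -1 then (-1:Int) else PySem.Chars.find t ['\t'] + 1) = -1 then [] else [(("\t":String), if PySem.Chars.find t ['\t'] = -1 then (-1:Int) else PySem.Chars.find t ['\t'] + 1)]) ++
              (if (if PySem.Chars.find t ['-'] = -1 then (-1:Int) else PySem.Chars.find t ['-'] + 1) = -1 then [] else [(("-":String), if PySem.Chars.find t ['-'] = -1 then (-1:Int) else PySem.Chars.find t ['-'] + 1)]))
              = (aIndices t).map (fun e => (e.1, e.2 + 1)) := by
            rw [aIndices_eq]
            by_cases g1 : PySem.Chars.find t [' '] = -1 <;>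
              by_cases g2 : PySem.Chars.find t ['\t'] = -1 <;>
                by_cases g3 : PySem.Chars.find t ['-'] = -1 <;>
                  simp [g1, g2, g3, n1, n2, n3]
          rw [hmap]
          by_cases hemp : aIndices t = []
          · have hb : bGo t 0 = ("", 0) := by rw [← ih]; simp [hemp]
            rw [show bGo (c :: t) 0 = bGo t 1 from by simp [bGo, hcs], bGo_shift t 1, hb]
            simp [hemp]
          · cases hmin : PySem.List.min? (aIndices t) (fun e => e.2) with
            | none => exact absurd ((PySem.List.min?_eq_none_iff _ _).1 hmin) hemp
            | some m =>
              have hm1 : m.1 ≠ "" := aIndices_fst_ne t m (PySem.List.min?_mem hmin)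
              rw [if_neg (by simp [hemp]), minMapShift, hmin]
              simp only [hemp, if_neg hemp, if_false] at ih
              rw [hmin] at ih
              simp only [Option.getD_some] at ih ⊢
              rw [show bGo (c :: t) 0 = bGo t 1 from by simp [bGo, hcs], bGo_shift t 1, ← ih]
              simp [hm1, Option.map_some]

-- ===== VERDICT (by name: the statement is the Claim_ definition above) =====
theorem find_next_sep_py_spec : Claim_equal_find_next_sep_py := by
  intro text _
  unfold Spec_find_next_sep_py find_next_sep_py find_next_sep_py_alt
  exact main_lemma text.toList
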